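-- pv_equiv track=rewrite | github.com/ielab/zeroshot-rankers-prompt-variations | rankers/listwise.py | receive_permutation
-- ===== SOURCE A (Python) =====
-- import copy
--
-- def clean_response(response: str):
--     new_response = ''
--     for c in response:
--         if not c.isdigit():
--             new_response += ' '
--         else:
--             try:
--                 int(c)
--                 new_response += c
--             except:
--                 new_response += ' '
--     new_response = new_response.strip()
--     return new_response
--
-- def remove_duplicate(response):
--     new_response = []
--     for c in response:
--         if c not in new_response:
--             new_response.append(c)
--     return new_response
--
-- def receive_permutation(ranking, permutation, rank_start=0, rank_end=100):
--     response = clean_response(permutation)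
--     # response = [int(x) - 1 for x in response.split()]
--     response = [int(x) - 1 for x in response.split()]
--     response = remove_duplicate(response)
--     cut_range = copy.deepcopy(ranking[rank_start: rank_end])
--     original_rank = [tt for tt in range(len(cut_range))]
--     response = [ss for ss in response if ss in original_rank]
--     response = response + [tt for tt in original_rank if tt not in response]
--
--     for j, x in enumerate(response):
--         ranking[j + rank_start] = cut_range[x]
--
--     return ranking
-- ===== SOURCE B (Python) =====
-- def receive_permutation(ranking, permutation, rank_start=0, rank_end=100):
--     window = ranking[rank_start:rank_end]
--     n = len(window)
--     used = [False] * n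
--     order = []
--     run = ''
--     for c in permutation + ' ':
--         if '0' <= c <= '9':
--             run += c
--         elif run:
--             idx = int(run) - 1
--             if 0 <= idx < n and not used[idx]:
--                 used[idx] = True
--                 order.append(idx)
--             run = ''
--     order += [i for i in range(n) if not used[i]]
--     for j, x in enumerate(order):
--         ranking[j + rank_start] = window[x]
--     return ranking
-- ===== Notes on version B (the rewrite author's own statement) =====
-- stated objective: faster
-- what changed: B fuses A's six passes (clean string, split, int-map, quadratic list-dedup, range-filter, missing-append) into a single scan over the permutation string that accumulates digit runs and dedups/range-checks via a boolean used-array, then appends the unused window indices in ascending order.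
-- outside the precondition, e.g. on receive_permutation([1, 2, 3], '2 1', -7, 2): A raises IndexError, B raises IndexError
import Mathlib
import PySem

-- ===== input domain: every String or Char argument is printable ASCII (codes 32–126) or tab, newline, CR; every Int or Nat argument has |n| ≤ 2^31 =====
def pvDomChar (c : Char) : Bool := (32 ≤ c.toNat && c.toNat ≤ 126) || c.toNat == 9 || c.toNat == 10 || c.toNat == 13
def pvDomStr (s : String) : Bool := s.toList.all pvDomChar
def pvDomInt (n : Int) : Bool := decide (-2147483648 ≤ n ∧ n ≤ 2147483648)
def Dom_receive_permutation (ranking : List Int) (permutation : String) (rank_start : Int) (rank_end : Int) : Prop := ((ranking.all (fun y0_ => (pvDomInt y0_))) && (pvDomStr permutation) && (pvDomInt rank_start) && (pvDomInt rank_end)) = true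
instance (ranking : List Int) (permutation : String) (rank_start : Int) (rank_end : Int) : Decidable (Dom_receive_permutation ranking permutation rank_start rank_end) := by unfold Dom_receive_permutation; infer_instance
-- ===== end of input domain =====

-- B fuses A's clean/split/int-map/dedup/range-filter/append passes into one scan over the
-- permutation string with a boolean used-array (objective: faster on duplicate-heavy input —
-- no quadratic list-membership dedup). Both A and B mutate `ranking` in place identically;
-- the equivalence proved here is about the return value.

-- ===== PORT A =====
-- clean_response: the try/except around int(c) never fires for a digit char, so it is the digit branch.
def pvCleanResponse (response : String) : String :=
  String.ofList (PySem.Chars.strip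
    (response.toList.foldl
      (fun acc c => if !(PySem.Chars.isdigit c) then acc ++ [' '] else acc ++ [c]) []))

def pvRemoveDuplicate (response : List Int) : List Int :=
  response.foldl (fun acc c => if !(acc.contains c) then acc ++ [c] else acc) []

-- int(x) on a whitespace-split token of the cleaned string never raises (all-digit, nonempty),
-- so `(… ).getD 0` is the Python value; deepcopy of a list of ints is the slice itself;
-- the write `ranking[j+rank_start] = …` is pySetD (total form; IndexError excluded by Pre_).
def receive_permutation (ranking : List Int) (permutation : String) (rank_start : Int) (rank_end : Int) : List Int :=
  let response1 := (PySem.Str.split₀ (pvCleanResponse permutation)).map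
      (fun x => (PySem.Int.ofStr? x).getD 0 - 1)
  let response2 := pvRemoveDuplicate response1
  let cut_range := PySem.List.slice ranking (some rank_start) (some rank_end)
  let original_rank := PySem.List.pyRange 0 (PySem.List.len cut_range) 1
  let response3 := response2.filter (fun ss => original_rank.contains ss)
  let response4 := response3 ++ original_rank.filter (fun tt => !(response3.contains tt))
  (PySem.List.enumerate response4 0).foldl
    (fun rk jx => PySem.List.pySetD rk (jx.1 + rank_start) (PySem.List.pyGetD cut_range jx.2 0))
    ranking

-- ===== PORT B =====
-- one step of Source B's single scan: state = (used array, output order, current digit run)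
def pvStep (n : Nat) (s : List Bool × List Int × List Char) (c : Char) : List Bool × List Int × List Char :=
  if '0' ≤ c ∧ c ≤ '9' then (s.1, s.2.1, s.2.2 ++ [c])
  else if s.2.2 ≠ [] then
    let idx := (PySem.Int.ofStr? (String.ofList s.2.2)).getD 0 - 1
    if 0 ≤ idx ∧ idx < (n : Int) ∧ PySem.List.pyGetD s.1 idx false = false then
      (PySem.List.pySetD s.1 idx true, s.2.1 ++ [idx], [])
    else (s.1, s.2.1, [])
  else s

def receive_permutation_alt (ranking : List Int) (permutation : String) (rank_start : Int) (rank_end : Int) : List Int :=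
  let window := PySem.List.slice ranking (some rank_start) (some rank_end)
  let n := window.length
  let st := (permutation.toList ++ [' ']).foldl (pvStep n) (List.replicate n false, [], [])
  let order := st.2.1 ++ (PySem.List.pyRange 0 (n : Int) 1).filter
      (fun i => !(PySem.List.pyGetD st.1 i false))
  (PySem.List.enumerate order 0).foldl
    (fun rk jx => PySem.List.pySetD rk (jx.1 + rank_start) (PySem.List.pyGetD window jx.2 0))
    ranking

-- ===== PRECONDITION & SPEC =====
-- Pre_ excludes exactly the inputs on which A raises IndexError: a rank_start below
-- -len(ranking) together with a nonempty window makes the very first write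
-- ranking[0 + rank_start] = … fall outside Python's negative-index range.
def Pre_receive_permutation (ranking : List Int) (permutation : String) (rank_start : Int) (rank_end : Int) : Prop :=
  -(ranking.length : Int) ≤ rank_start ∨ PySem.List.slice ranking (some rank_start) (some rank_end) = []
instance (ranking : List Int) (permutation : String) (rank_start : Int) (rank_end : Int) : Decidable (Pre_receive_permutation ranking permutation rank_start rank_end) := by unfold Pre_receive_permutation; infer_instance

def pvWitness_receive_permutation : List Int × String × Int × Int := ([7, 3, 5, 9], "[2] > [4] > [2] > [1]", 0, 100)

def Spec_receive_permutation (ranking : List Int) (permutation : String) (rank_start : Int) (rank_end : Int) (out : List Int) : Prop := out = receive_permutation_alt ranking permutation rank_start rank_end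
instance (ranking : List Int) (permutation : String) (rank_start : Int) (rank_end : Int) (out : List Int) : Decidable (Spec_receive_permutation ranking permutation rank_start rank_end out) := by unfold Spec_receive_permutation; infer_instance

-- ===== CLAIM (what is proved, stated in full; the proofs are below) =====
def Claim_equal_receive_permutation : Prop := ∀ (ranking : List Int) (permutation : String) (rank_start : Int) (rank_end : Int), Dom_receive_permutation ranking permutation rank_start rank_end → Pre_receive_permutation ranking permutation rank_start rank_end → Spec_receive_permutation ranking permutation rank_start rank_end (receive_permutation ranking permutation rank_start rank_end)

-- ===== LEMMAS AND PROOFS =====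

def pvRuns : List Char → List Char → List (List Char)
  | p, [] => if p.isEmpty then [] else [p]
  | p, c :: cs => if PySem.Chars.isdigit c then pvRuns (p ++ [c]) cs
                  else if p.isEmpty then pvRuns [] cs else p :: pvRuns [] cs

def pvClean1 (c : Char) : Char := if PySem.Chars.isdigit c then c else ' '

lemma pv_isspace_of_isdigit (c : Char) (h : PySem.Chars.isdigit c = true) : PySem.Chars.isspace c = false := by
  simp [PySem.Chars.isdigit, Char.le_def, UInt32.le_iff_toNat_le] at h
  have hv : c.toNat = c.val.toNat := rfl
  simp [PySem.Chars.isspace]; omega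

lemma pv_go_clean (cs : List Char) : ∀ (cur : List Char) (acc : List (List Char)),
    PySem.Chars.split₀.go (cs.map pvClean1) cur acc = acc.reverse ++ pvRuns cur.reverse cs := by
  induction cs with
  | nil => intro cur acc; by_cases h : cur.isEmpty <;>
      simp [PySem.Chars.split₀.go, pvRuns, h, List.isEmpty_iff] at * <;> simp [h]
  | cons c rest ih =>
    intro cur acc
    by_cases hd : PySem.Chars.isdigit c
    · have hs := pv_isspace_of_isdigit c hd
      simp [pvClean1, hd, PySem.Chars.split₀.go, hs, pvRuns, ih]
    · have hd' : PySem.Chars.isdigit c = false := by simpa using hd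
      have h1 : pvClean1 c = ' ' := by simp [pvClean1, hd']
      have hsp : PySem.Chars.isspace ' ' = true := by decide
      by_cases hc : cur.isEmpty
      · simp [h1, PySem.Chars.split₀.go, hsp, hc, pvRuns, hd', ih, List.isEmpty_iff.mp hc]
      · simp [h1, PySem.Chars.split₀.go, hsp, hc, pvRuns, hd', ih]

lemma pv_go_all_spaces (t : List Char) (h : ∀ c ∈ t, PySem.Chars.isspace c = true) :
    ∀ cur acc, PySem.Chars.split₀.go t cur acc = PySem.Chars.split₀.go [] cur acc := by
  induction t with
  | nil => intro cur acc; rfl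
  | cons c t' ih =>
    intro cur acc
    have hc := h c (by simp)
    have ih' := ih (fun d hd => h d (by simp [hd]))
    by_cases he : cur.isEmpty <;>
      simp [PySem.Chars.split₀.go, hc, he, ih', List.isEmpty_iff] at * <;> simp [he]

lemma pv_go_append_spaces (l : List Char) : ∀ (t : List Char), (∀ c ∈ t, PySem.Chars.isspace c = true) →
    ∀ cur acc, PySem.Chars.split₀.go (l ++ t) cur acc = PySem.Chars.split₀.go l cur acc := by
  induction l with
  | nil => intro t h cur acc; simpa using pv_go_all_spaces t h cur acc
  | cons c l' ih =>
    intro t h cur acc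
    by_cases hc : PySem.Chars.isspace c <;> by_cases he : cur.isEmpty <;>
      simp [PySem.Chars.split₀.go, hc, he, ih t h]

lemma pv_split_strip (l : List Char) :
    PySem.Chars.split₀ (PySem.Chars.strip l) = PySem.Chars.split₀ l := by
  unfold PySem.Chars.strip PySem.Chars.split₀
  have hl : ∀ (m : List Char), PySem.Chars.split₀.go (PySem.Chars.lstrip m) [] [] = PySem.Chars.split₀.go m [] [] := by
    intro m; induction m with
    | nil => rfl
    | cons c m' ih =>
      by_cases hc : PySem.Chars.isspace c
      · simpa [PySem.Chars.lstrip, hc, PySem.Chars.split₀.go] using ih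
      · simp [PySem.Chars.lstrip, hc]
  have hr : ∀ (m : List Char), PySem.Chars.split₀.go (PySem.Chars.rstrip m) [] [] = PySem.Chars.split₀.go m [] [] := by
    intro m
    have hdecomp : m = PySem.Chars.rstrip m ++ (m.reverse.takeWhile PySem.Chars.isspace).reverse := by
      unfold PySem.Chars.rstrip
      have := List.takeWhile_append_dropWhile (p := PySem.Chars.isspace) (l := m.reverse)
      nth_rewrite 1 [← m.reverse_reverse]
      nth_rewrite 1 [← this]
      rw [List.reverse_append]
    conv_rhs => rw [hdecomp]
    rw [pv_go_append_spaces]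
    intro c hcmem
    have := List.mem_takeWhile_imp (l := m.reverse) (p := PySem.Chars.isspace) (by simpa using hcmem)
    exact this
  rw [hr, hl]

lemma pv_clean_fold (s : String) :
    (s.toList.foldl (fun acc c => if !(PySem.Chars.isdigit c) then acc ++ [' '] else acc ++ [c]) [])
      = s.toList.map pvClean1 := by
  have h : (fun (acc : List Char) c => if !(PySem.Chars.isdigit c) then acc ++ [' '] else acc ++ [c])
       = (fun acc c => acc ++ [pvClean1 c]) := by
    funext acc c; by_cases h : PySem.Chars.isdigit c <;> simp [pvClean1, h]
  rw [h, PySem.List.foldl_append_singleton_eq_map]; simp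

lemma pv_tokens (s : String) :
    (PySem.Str.split₀ (pvCleanResponse s)).map String.toList = pvRuns [] s.toList := by
  rw [PySem.Str.split₀_map_toList]
  unfold pvCleanResponse
  rw [pv_clean_fold]
  have : (String.ofList (PySem.Chars.strip (s.toList.map pvClean1))).toList
       = PySem.Chars.strip (s.toList.map pvClean1) := by simp
  rw [this, pv_split_strip]
  unfold PySem.Chars.split₀
  simpa using pv_go_clean s.toList [] []

def pvTok (n : Nat) (uo : List Bool × List Int) (t : List Char) : List Bool × List Int :=
  let idx := (PySem.Int.ofStr? (String.ofList t)).getD 0 - 1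
  if 0 ≤ idx ∧ idx < (n : Int) ∧ PySem.List.pyGetD uo.1 idx false = false then
    (PySem.List.pySetD uo.1 idx true, uo.2 ++ [idx])
  else uo

lemma pv_digit_iff (c : Char) : ('0' ≤ c ∧ c ≤ '9') ↔ PySem.Chars.isdigit c = true := by
  simp [PySem.Chars.isdigit]

lemma pv_foldB (n : Nat) (cs : List Char) : ∀ (u : List Bool) (o : List Int) (run : List Char),
    (cs ++ [' ']).foldl (pvStep n) (u, o, run)
      = (((pvRuns run cs).foldl (pvTok n) (u, o)).1, ((pvRuns run cs).foldl (pvTok n) (u, o)).2, []) := by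
  induction cs with
  | nil =>
    intro u o run
    have hnd : ¬ ('0' ≤ ' ' ∧ ' ' ≤ '9') := by decide
    by_cases hr : run = []
    · simp [pvStep, hnd, hr, pvRuns]
    · simp only [List.nil_append, List.foldl_cons, List.foldl_nil, pvStep, hnd, if_false, hr,
        if_true, ne_eq, not_false_iff, if_neg]
      simp [hr, pvRuns, List.isEmpty_iff, pvTok]
      split <;> simp
  | cons c rest ih =>
    intro u o run
    by_cases hd : '0' ≤ c ∧ c ≤ '9'
    · have hdig : PySem.Chars.isdigit c = true := (pv_digit_iff c).mp hd
      have h1 : pvStep n (u, o, run) c = (u, o, run ++ [c]) := by simp [pvStep, hd]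
      simp only [List.cons_append, List.foldl_cons, h1, ih, pvRuns, hdig, if_true]
    · have hdig : ¬ PySem.Chars.isdigit c = true := fun h => hd ((pv_digit_iff c).mpr h)
      by_cases hr : run = []
      · simp [pvStep, hd, hr, ih, pvRuns, hdig]
      · simp only [List.cons_append, List.foldl_cons, pvStep, hd, if_false, hr, ne_eq,
          not_false_iff, if_true, if_neg]
        simp only [pvRuns, hdig, if_false, List.isEmpty_iff, hr, if_neg, List.foldl_cons]
        simp [pvTok, ih]
        split <;> simp [ih]

def pvDfs (n : Nat) (o : List Int) (v : Int) : List Int :=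
  if 0 ≤ v ∧ v < (n : Int) ∧ o.contains v = false then o ++ [v] else o

lemma pv_filter_dedup (n : Nat) (xs : List Int) : ∀ (o : List Int),
    (xs.foldl (fun acc c => if !(acc.contains c) then acc ++ [c] else acc) o).filter
        (fun v => decide (0 ≤ v ∧ v < (n : Int)))
      = xs.foldl (pvDfs n) (o.filter (fun v => decide (0 ≤ v ∧ v < (n : Int)))) := by
  induction xs with
  | nil => intro o; simp
  | cons x xs ih =>
    intro o
    simp only [List.foldl_cons]
    rw [ih]
    congr 1
    have hfmem : x ∈ o.filter (fun v => decide (0 ≤ v ∧ v < (n : Int))) ↔ (x ∈ o ∧ (0 ≤ x ∧ x < (n : Int))) := by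
      simp [List.mem_filter]
    by_cases hp : 0 ≤ x ∧ x < (n : Int) <;> by_cases hc : x ∈ o
    · have h1 : (o.filter (fun v => decide (0 ≤ v ∧ v < (n : Int)))).contains x = true := by
        simp [List.contains_iff_mem, hfmem, hc, hp]
      simp [pvDfs, h1, hc]
      tauto
    · have h1 : (o.filter (fun v => decide (0 ≤ v ∧ v < (n : Int)))).contains x = false := by
        simp [List.contains_iff_mem, hfmem, hc]
      simp [pvDfs, h1, hc, hp, List.filter_append]
    · simp [pvDfs, hc]
      tauto
    · have hx : (decide (0 ≤ x) && decide (x < (n : Int))) = false := by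
        rcases (not_and_or.mp hp) with h | h <;> simp [h]
      simp [pvDfs, hc, List.filter_append, hx]
      omega

def pvInv (n : Nat) (u : List Bool) (o : List Int) : Prop :=
  u.length = n ∧ ∀ i : Nat, i < n → u.getD i false = o.contains (i : Int)

lemma pv_tok_step (n : Nat) (t : List Char) (u : List Bool) (o : List Int) (h : pvInv n u o) :
    (pvTok n (u, o) t).2 = pvDfs n o ((PySem.Int.ofStr? (String.ofList t)).getD 0 - 1)
      ∧ pvInv n (pvTok n (u, o) t).1 (pvTok n (u, o) t).2 := by
  obtain ⟨hlen, hinv⟩ := h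
  set idx := (PySem.Int.ofStr? (String.ofList t)).getD 0 - 1 with hidx
  by_cases hr : 0 ≤ idx ∧ idx < (n : Int)
  · have hnat : idx = ((idx.toNat : Nat) : Int) := (Int.toNat_of_nonneg hr.1).symm
    have hlt : idx.toNat < n := by omega
    have hg : PySem.List.pyGetD u idx false = o.contains idx := by
      rw [hnat, PySem.List.pyGetD_natCast, hinv idx.toNat hlt]
    by_cases hc : o.contains idx
    · have hng : ¬ (0 ≤ idx ∧ idx < (n : Int) ∧ PySem.List.pyGetD u idx false = false) := by
        rintro ⟨-, -, hf⟩; rw [hg, hc] at hf; cases hf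
      simp only [pvTok, ← hidx]
      rw [if_neg hng]
      refine ⟨?_, hlen, hinv⟩
      simp [pvDfs, hr.1, hr.2, hc, List.contains_iff_mem.mp hc]
    · have hc' : o.contains idx = false := by simpa using hc
      have hgu : (0 ≤ idx ∧ idx < (n : Int) ∧ PySem.List.pyGetD u idx false = false) :=
        ⟨hr.1, hr.2, by rw [hg, hc']⟩
      simp only [pvTok, ← hidx]
      rw [if_pos hgu]
      refine ⟨?_, ?_, ?_⟩
      · simp [pvDfs, hr.1, hr.2, hc']
        simpa using hc
      · rw [hnat, PySem.List.pySetD_natCast]; simpa using hlen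
      · intro i hi
        rw [hnat, PySem.List.pySetD_natCast]
        rw [List.getD_eq_getElem?_getD, List.getElem?_set]
        by_cases hie : idx.toNat = i
        · simp [hie, hlen, hi, List.contains_iff_mem, ← hnat, hie ▸ hnat]
        · have hne : ((i : Nat) : Int) ≠ idx := by omega
          simp [hie, hne, List.contains_iff_mem, ← List.getD_eq_getElem?_getD, hinv i hi]
          omega
  · have hno : ¬ (0 ≤ idx ∧ idx < (n : Int) ∧ PySem.List.pyGetD u idx false = false) := by tauto
    simp only [pvTok, ← hidx]
    rw [if_neg hno]
    refine ⟨?_, hlen, hinv⟩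
    simp [pvDfs, List.contains_iff_mem]
    intro h1 h2
    exact absurd ⟨h1, h2⟩ hr

lemma pv_tok_fold (n : Nat) (ts : List (List Char)) : ∀ (u : List Bool) (o : List Int), pvInv n u o →
    (ts.foldl (pvTok n) (u, o)).2
        = ts.foldl (fun o' t => pvDfs n o' ((PySem.Int.ofStr? (String.ofList t)).getD 0 - 1)) o
      ∧ pvInv n (ts.foldl (pvTok n) (u, o)).1 (ts.foldl (pvTok n) (u, o)).2 := by
  induction ts with
  | nil => intro u o h; exact ⟨rfl, h⟩
  | cons t ts ih =>
    intro u o h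
    obtain ⟨h1, h2⟩ := pv_tok_step n t u o h
    simp only [List.foldl_cons]
    rcases hE : pvTok n (u, o) t with ⟨u', o'⟩
    rw [hE] at h1 h2
    simp only at h1 h2
    rw [← h1]
    exact ih u' o' h2

lemma pv_ports_eq (ranking : List Int) (permutation : String) (rank_start : Int) (rank_end : Int) :
    receive_permutation ranking permutation rank_start rank_end
      = receive_permutation_alt ranking permutation rank_start rank_end := by
  unfold receive_permutation receive_permutation_alt
  dsimp only
  set cut := PySem.List.slice ranking (some rank_start) (some rank_end) with hcut
  set n := cut.length with hn
  set cs := permutation.toList with hcs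
  set ts := pvRuns [] cs with hts
  set val : List Char → Int := fun t => (PySem.Int.ofStr? (String.ofList t)).getD 0 - 1 with hval
  -- A-side token values
  have hresp1 : (PySem.Str.split₀ (pvCleanResponse permutation)).map
      (fun x => (PySem.Int.ofStr? x).getD 0 - 1) = ts.map val := by
    rw [hts, hcs, ← pv_tokens permutation, List.map_map]
    apply List.map_congr_left
    intro x _
    simp [hval, PySem.Int.ofStr?]
  -- range membership as a bound test
  have hrange : (fun ss => (PySem.List.pyRange 0 (PySem.List.len cut) 1).contains ss)
      = (fun v => decide (0 ≤ v ∧ v < (n : Int))) := by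
    funext v
    simp [List.contains_iff_mem, PySem.List.mem_pyRange_one, PySem.List.len_eq, hn]
  -- A's response3 as a single fold
  have hA : (pvRemoveDuplicate (ts.map val)).filter (fun v => decide (0 ≤ v ∧ v < (n : Int)))
      = ts.foldl (fun o' t => pvDfs n o' (val t)) [] := by
    unfold pvRemoveDuplicate
    rw [pv_filter_dedup n (ts.map val) [], List.foldl_map]
    simp
  -- B's scan
  have hinv0 : pvInv n (List.replicate n false) [] := by
    constructor
    · simp
    · intro i hi; simp [List.getD_eq_getElem?_getD, List.getElem?_replicate, hi]
  obtain ⟨hB2, hBlen, hBinv⟩ :=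
    (by simpa [hval] using pv_tok_fold n ts (List.replicate n false) [] hinv0 :
      (ts.foldl (pvTok n) (List.replicate n false, [])).2
          = ts.foldl (fun o' t => pvDfs n o' (val t)) []
        ∧ pvInv n (ts.foldl (pvTok n) (List.replicate n false, [])).1
            (ts.foldl (pvTok n) (List.replicate n false, [])).2)
  rw [pv_foldB n cs (List.replicate n false) [] []]
  set F := ts.foldl (pvTok n) (List.replicate n false, []) with hF
  -- identify response3 with F.2
  have hr3 : (pvRemoveDuplicate ((PySem.Str.split₀ (pvCleanResponse permutation)).map
        (fun x => (PySem.Int.ofStr? x).getD 0 - 1))).filter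
        (fun ss => (PySem.List.pyRange 0 (PySem.List.len cut) 1).contains ss) = F.2 := by
    rw [hresp1, hrange, hA, ← hB2]
  -- identify the missing tails
  have htail : (PySem.List.pyRange 0 (PySem.List.len cut) 1).filter (fun tt => !(F.2.contains tt))
      = (PySem.List.pyRange 0 ((n : Nat) : Int) 1).filter (fun i => !(PySem.List.pyGetD F.1 i false)) := by
    rw [PySem.List.len_eq, ← hn]
    apply List.filter_congr
    intro i hi
    rw [PySem.List.mem_pyRange_one] at hi
    have hnat : i = ((i.toNat : Nat) : Int) := (Int.toNat_of_nonneg hi.1).symm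
    have hlt : i.toNat < n := by omega
    rw [hnat, PySem.List.pyGetD_natCast, hBinv i.toNat hlt]
  rw [hr3, htail]

-- ===== VERDICT (by name: the statement is the Claim_ definition above) =====
theorem receive_permutation_spec : Claim_equal_receive_permutation := by
  intro ranking permutation rank_start rank_end _ _
  unfold Spec_receive_permutation
  exact pv_ports_eq ranking permutation rank_start rank_end
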